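-- pv_equiv track=rewrite | github.com/enam-0042/python-test | services/legacy_crypto_algorithm.py | _remove_garbage_from_key
-- ===== SOURCE A (Python) =====
-- def _remove_garbage_from_key(key: str) -> str:
--     """
--     Removes garbage characters.
--     """
--     should_increase = True
--     lowest_garbage = 4
--     highest_garbage = 10
--     no_of_garbage = highest_garbage
--
--     final_key = ""
--     skip_counter = 0
--
--     for char in key:
--         if skip_counter < no_of_garbage:
--             skip_counter += 1
--             continue
--
--         final_key += char
--         skip_counter = 0
--
--         if should_increase:
--             no_of_garbage += 1
--         else:
--             no_of_garbage -= 1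
--
--         if no_of_garbage == highest_garbage:
--             should_increase = False
--         elif no_of_garbage == lowest_garbage:
--             should_increase = True
--
--     return final_key
-- ===== SOURCE B (Python) =====
-- def _remove_garbage_from_key(key: str) -> str:
--     # Jump straight to the kept positions (10, 22, 35, 49, ...) instead of
--     # scanning every character: the gap only ever grows by 1 per kept char.
--     out = []
--     n = len(key)
--     i = 10
--     g = 10
--     while i < n:
--         out.append(key[i])
--         g += 1
--         i += g + 1
--     return "".join(out)
-- ===== Notes on version B (the rewrite author's own statement) =====
-- stated objective: faster
-- what changed: Instead of scanning every character with a skip counter, B computes the kept indices directly (start at 10, then jump by an ever-growing gap) and touches only O(sqrt(n)) positions; A's bounce logic is dead since the gap only ever increases.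
import Mathlib
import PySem

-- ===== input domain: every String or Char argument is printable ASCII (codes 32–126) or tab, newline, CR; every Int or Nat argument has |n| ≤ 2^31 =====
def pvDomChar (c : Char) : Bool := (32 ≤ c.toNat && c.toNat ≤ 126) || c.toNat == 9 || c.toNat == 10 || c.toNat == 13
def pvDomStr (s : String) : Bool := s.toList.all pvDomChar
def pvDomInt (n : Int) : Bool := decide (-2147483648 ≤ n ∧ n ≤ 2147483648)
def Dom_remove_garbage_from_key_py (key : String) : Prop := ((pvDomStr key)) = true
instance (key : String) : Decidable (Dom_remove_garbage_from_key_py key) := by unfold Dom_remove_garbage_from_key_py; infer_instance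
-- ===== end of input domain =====

-- B computes the kept indices directly (10, 22, 35, ...) instead of scanning every character.

-- ===== PORT A =====
-- loop body of A, on state (should_increase, no_of_garbage, final_key, skip_counter)
def stepA (st : Bool × Int × List Char × Int) (char : Char) : Bool × Int × List Char × Int :=
  let si := st.1
  let g := st.2.1
  let fk := st.2.2.1
  let sk := st.2.2.2
  if sk < g then (si, g, fk, sk + 1)
  else
    let fk := fk ++ [char]
    let sk : Int := 0
    let g := if si then g + 1 else g - 1
    let si := if g == (10 : Int) then false
              else if g == (4 : Int) then true
              else si
    (si, g, fk, sk)

def remove_garbage_from_key_py (key : String) : String :=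
  String.ofList (key.toList.foldl stepA (true, 10, [], 0)).2.2.1

-- ===== PORT B =====
-- Source B's while loop: keep key[i], grow the gap, jump past the next run
def altChars (cs : List Char) (i g : Nat) : List Char :=
  if h : i < cs.length then
    let g' := g + 1
    cs[i] :: altChars cs (i + g' + 1) g'
  else []
termination_by cs.length - i
decreasing_by omega

def remove_garbage_from_key_py_alt (key : String) : String :=
  String.ofList (altChars key.toList 10 10)

-- ===== PRECONDITION & SPEC =====
def Spec_remove_garbage_from_key_py (key : String) (out : String) : Prop := out = remove_garbage_from_key_py_alt key
instance (key : String) (out : String) : Decidable (Spec_remove_garbage_from_key_py key out) := by unfold Spec_remove_garbage_from_key_py; infer_instance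

-- ===== CLAIM (what is proved, stated in full; the proofs are below) =====
def Claim_equal_remove_garbage_from_key_py : Prop := ∀ (key : String), Dom_remove_garbage_from_key_py key → Spec_remove_garbage_from_key_py key (remove_garbage_from_key_py key)

-- ===== LEMMAS AND PROOFS =====

-- middle form: skip r chars, keep one, then skip g+1, keep one, ...
def midChars : List Char → Nat → Nat → List Char
  | [], _, _ => []
  | c :: t, 0, g => c :: midChars t (g + 1) (g + 1)
  | _ :: t, r + 1, g => midChars t r g

lemma midChars_drop (l : List Char) (r g : Nat) :
    midChars l r g = midChars (l.drop r) 0 g := by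
  induction l generalizing r with
  | nil => simp [midChars]
  | cons c t ih =>
    cases r with
    | zero => simp
    | succ n => simpa [midChars] using ih n

lemma altChars_eq_mid (cs : List Char) (i g : Nat) :
    altChars cs i g = midChars (cs.drop i) 0 g := by
  by_cases h : i < cs.length
  · rw [altChars]
    simp only [h, dif_pos]
    rw [List.drop_eq_getElem_cons h, midChars]
    rw [altChars_eq_mid cs (i + (g + 1) + 1) (g + 1)]
    rw [midChars_drop (cs.drop (i + 1)) (g + 1) (g + 1)]
    rw [List.drop_drop, show i + 1 + (g + 1) = i + (g + 1) + 1 by omega]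
  · rw [altChars]
    simp only [h, dif_neg, not_false_iff]
    rw [List.drop_eq_nil_of_le (by omega)]
    rfl
termination_by cs.length - i
decreasing_by omega

lemma stepA_skip (si : Bool) (g : Int) (fk : List Char) (sk : Int) (c : Char)
    (h : sk < g) : stepA (si, g, fk, sk) c = (si, g, fk, sk + 1) := by
  simp [stepA, h]

lemma stepA_keep (g : Int) (fk : List Char) (sk : Int) (c : Char)
    (h : ¬ sk < g) (h10 : g + 1 ≠ 10) (h4 : g + 1 ≠ 4) :
    stepA (true, g, fk, sk) c = (true, g + 1, fk ++ [c], 0) := by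
  simp [stepA, h, h10, h4]

-- invariant: should_increase stays true and the gap g ≥ 10 only grows
lemma loopA_eq_mid (l : List Char) (g k : Nat) (fk : List Char)
    (hg : 10 ≤ g) (hk : k ≤ g) :
    (l.foldl stepA (true, (g : Int), fk, (k : Int))).2.2.1
      = fk ++ midChars l (g - k) g := by
  induction l generalizing g k fk with
  | nil => simp [midChars]
  | cons c t ih =>
    rw [List.foldl_cons]
    by_cases hlt : k < g
    · rw [stepA_skip _ _ _ _ c (by exact_mod_cast hlt)]
      rw [show ((k : Int) + 1) = ((k + 1 : Nat) : Int) by push_cast; ring]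
      rw [ih g (k + 1) fk hg (by omega)]
      obtain ⟨r, hr⟩ : ∃ r, g - k = r + 1 := ⟨g - k - 1, by omega⟩
      rw [hr, show g - (k + 1) = r by omega]
      simp [midChars]
    · have hkg : k = g := by omega
      subst hkg
      rw [stepA_keep _ _ _ c (by exact_mod_cast hlt) (by omega) (by omega)]
      rw [show ((k : Int) + 1) = ((k + 1 : Nat) : Int) by push_cast; ring]
      rw [show ((0 : Int)) = ((0 : Nat) : Int) from rfl]
      rw [ih (k + 1) 0 (fk ++ [c]) (by omega) (by omega)]
      simp [midChars]

-- ===== VERDICT (by name: the statement is the Claim_ definition above) =====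
theorem remove_garbage_from_key_py_spec : Claim_equal_remove_garbage_from_key_py := by
  intro key _
  unfold Spec_remove_garbage_from_key_py remove_garbage_from_key_py remove_garbage_from_key_py_alt
  rw [altChars_eq_mid, ← midChars_drop]
  rw [show ((10 : Int)) = ((10 : Nat) : Int) from rfl,
      show ((0 : Int)) = ((0 : Nat) : Int) from rfl]
  rw [loopA_eq_mid key.toList 10 0 [] (by omega) (by omega)]
  simp
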